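-- pv_equiv track=rewrite | github.com/pypi-data/pypi-mirror-403 | packages/mcp-context-server/mcp_context_server-1.3.1.tar.gz/mcp_context_server-1.3.1/app/fusion.py | count_unique_results
-- ===== SOURCE A (Python) =====
-- from typing import Any
--
-- def count_unique_results(
--     fts_results: list[dict[str, Any]],
--     semantic_results: list[dict[str, Any]],
-- ) -> tuple[int, int, int]:
--     """Count unique and overlapping results between FTS and semantic search.
--
--     Args:
--         fts_results: Results from full-text search.
--         semantic_results: Results from semantic search.
--
--     Returns:
--         Tuple of (fts_only_count, semantic_only_count, overlap_count).
--     """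
--     fts_ids = {r.get('id') for r in fts_results if r.get('id') is not None}
--     semantic_ids = {r.get('id') for r in semantic_results if r.get('id') is not None}
--
--     overlap = fts_ids & semantic_ids
--     fts_only = fts_ids - semantic_ids
--     semantic_only = semantic_ids - fts_ids
--
--     return len(fts_only), len(semantic_only), len(overlap)
-- ===== SOURCE B (Python) =====
-- def count_unique_results(fts_results, semantic_results):
--     seen = {}
--     for r in fts_results:
--         rid = r.get('id')
--         if rid is not None:
--             seen.setdefault(rid, [False, False])[0] = True
--     for r in semantic_results:
--         rid = r.get('id')
--         if rid is not None:
--             seen.setdefault(rid, [False, False])[1] = True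
--     fts_only = semantic_only = overlap = 0
--     for in_fts, in_sem in seen.values():
--         if in_fts and in_sem:
--             overlap += 1
--         elif in_fts:
--             fts_only += 1
--         else:
--             semantic_only += 1
--     return fts_only, semantic_only, overlap
-- ===== Notes on version B (the rewrite author's own statement) =====
-- stated objective: alternative
-- what changed: Replaces the two id-sets plus three set-algebra operations (&, -, -) with a single dict mapping each id to (in_fts, in_semantic) flags built in one combined pass, classified by one branching loop over its values.
import Mathlib
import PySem

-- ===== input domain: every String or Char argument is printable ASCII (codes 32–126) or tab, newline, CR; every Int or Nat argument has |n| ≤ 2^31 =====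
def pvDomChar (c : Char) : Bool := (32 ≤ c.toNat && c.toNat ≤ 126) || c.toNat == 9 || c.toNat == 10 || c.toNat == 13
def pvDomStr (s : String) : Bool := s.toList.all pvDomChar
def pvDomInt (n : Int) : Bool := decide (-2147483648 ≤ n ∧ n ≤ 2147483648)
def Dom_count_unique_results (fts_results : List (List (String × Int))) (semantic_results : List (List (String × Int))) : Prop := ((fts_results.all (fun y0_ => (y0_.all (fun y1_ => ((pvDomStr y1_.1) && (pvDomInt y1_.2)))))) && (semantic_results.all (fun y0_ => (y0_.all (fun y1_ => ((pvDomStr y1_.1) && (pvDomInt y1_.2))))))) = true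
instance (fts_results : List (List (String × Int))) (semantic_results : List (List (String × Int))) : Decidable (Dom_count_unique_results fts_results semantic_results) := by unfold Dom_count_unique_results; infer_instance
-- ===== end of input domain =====

-- B replaces the two id-sets and three set-algebra operations with one dict of
-- (in_fts, in_semantic) flags built in a combined pass and one classification loop (objective: alternative).

-- ===== PORT A =====
def count_unique_results (fts_results : List (List (String × Int))) (semantic_results : List (List (String × Int))) : Int × Int × Int :=
  -- fts_ids = {r.get('id') for r in fts_results if r.get('id') is not None}
  let fts_ids : PySem.Set Int := fts_results.foldl (fun s r =>
    match (PySem.Dict.mk r).get? "id" with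
    | some v => PySem.Set.add s v
    | none => s) PySem.Set.empty
  let semantic_ids : PySem.Set Int := semantic_results.foldl (fun s r =>
    match (PySem.Dict.mk r).get? "id" with
    | some v => PySem.Set.add s v
    | none => s) PySem.Set.empty
  let overlap := PySem.Set.inter fts_ids semantic_ids
  let fts_only := PySem.Set.diff fts_ids semantic_ids
  let semantic_only := PySem.Set.diff semantic_ids fts_ids
  (PySem.Set.len fts_only, PySem.Set.len semantic_only, PySem.Set.len overlap)

-- ===== PORT B =====
def count_unique_results_alt (fts_results : List (List (String × Int))) (semantic_results : List (List (String × Int))) : Int × Int × Int :=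
  -- seen[rid] = [in_fts, in_semantic]; setdefault + flag mutation = insert of the updated pair
  let seen1 : PySem.Dict Int (Bool × Bool) := fts_results.foldl (fun d r =>
    match (PySem.Dict.mk r).get? "id" with
    | some v => d.insert v (true, (d.getD v (false, false)).2)
    | none => d) PySem.Dict.empty
  let seen : PySem.Dict Int (Bool × Bool) := semantic_results.foldl (fun d r =>
    match (PySem.Dict.mk r).get? "id" with
    | some v => d.insert v ((d.getD v (false, false)).1, true)
    | none => d) seen1
  seen.values.foldl (fun acc fl =>
    if fl.1 && fl.2 then (acc.1, acc.2.1, acc.2.2 + 1)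
    else if fl.1 then (acc.1 + 1, acc.2.1, acc.2.2)
    else (acc.1, acc.2.1 + 1, acc.2.2)) (0, 0, 0)

-- ===== PRECONDITION & SPEC =====
def Spec_count_unique_results (fts_results : List (List (String × Int))) (semantic_results : List (List (String × Int))) (out : Int × Int × Int) : Prop := out = count_unique_results_alt fts_results semantic_results
instance (fts_results : List (List (String × Int))) (semantic_results : List (List (String × Int))) (out : Int × Int × Int) : Decidable (Spec_count_unique_results fts_results semantic_results out) := by unfold Spec_count_unique_results; infer_instance

-- ===== CLAIM (what is proved, stated in full; the proofs are below) =====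
def Claim_equal_count_unique_results : Prop := ∀ (fts_results : List (List (String × Int))) (semantic_results : List (List (String × Int))), Dom_count_unique_results fts_results semantic_results → Spec_count_unique_results fts_results semantic_results (count_unique_results fts_results semantic_results)

-- ===== LEMMAS AND PROOFS =====

-- a fold over the records that acts only when r.get('id') is present is a fold over the extracted ids
theorem foldl_getId {σ : Type} (f : σ → Int → σ) (rs : List (List (String × Int))) (init : σ) :
    rs.foldl (fun s r =>
      match (PySem.Dict.mk r).get? "id" with
      | some v => f s v
      | none => s) init
    = (rs.filterMap (fun r => (PySem.Dict.mk r).get? "id")).foldl f init := by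
  induction rs generalizing init with
  | nil => rfl
  | cons r rs ih =>
    cases h : (PySem.Dict.mk r).get? "id" <;>
      simp [h, ih]

-- after the first flag pass, the flag pair at v is (old.1 || v ∈ F, old.2)
theorem getD_pass1 (F : List Int) (d : PySem.Dict Int (Bool × Bool)) (v : Int) :
    (F.foldl (fun d x => d.insert x (true, (d.getD x (false, false)).2)) d).getD v (false, false)
    = ((d.getD v (false, false)).1 || decide (v ∈ F), (d.getD v (false, false)).2) := by
  induction F generalizing d with
  | nil => simp
  | cons a F ih =>
    simp only [List.foldl_cons, ih, PySem.Dict.getD_insert]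
    by_cases h : v = a <;> simp [h]

-- after the second flag pass, the flag pair at v is (old.1, old.2 || v ∈ S)
theorem getD_pass2 (S : List Int) (d : PySem.Dict Int (Bool × Bool)) (v : Int) :
    (S.foldl (fun d x => d.insert x ((d.getD x (false, false)).1, true)) d).getD v (false, false)
    = ((d.getD v (false, false)).1, (d.getD v (false, false)).2 || decide (v ∈ S)) := by
  induction S generalizing d with
  | nil => simp
  | cons a S ih =>
    simp only [List.foldl_cons, ih, PySem.Dict.getD_insert]
    by_cases h : v = a <;> simp [h]

-- the classification loop computes three countP's
theorem count_fold (L : List (Bool × Bool)) (a b c : Int) :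
    L.foldl (fun acc fl =>
      if fl.1 && fl.2 then (acc.1, acc.2.1, acc.2.2 + 1)
      else if fl.1 then (acc.1 + 1, acc.2.1, acc.2.2)
      else (acc.1, acc.2.1 + 1, acc.2.2)) (a, b, c)
    = (a + (L.countP (fun fl => fl.1 && !fl.2) : Int),
       b + (L.countP (fun fl => !fl.1) : Int),
       c + (L.countP (fun fl => fl.1 && fl.2) : Int)) := by
  induction L generalizing a b c with
  | nil => simp
  | cons fl L ih =>
    obtain ⟨x, y⟩ := fl
    cases x <;> cases y <;>
      simp only [List.foldl_cons, List.countP_cons, ih] <;> simp <;> omega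

theorem contains_ofList_eq (S : List Int) (k : Int) :
    PySem.Set.contains (PySem.Set.ofList S) k = decide (k ∈ S) := by
  by_cases h : k ∈ S <;> simp [PySem.Set.mem_ofList, h]

theorem countA1 (F S : List Int) :
    (PySem.Set.diff (PySem.Set.ofList F) (PySem.Set.ofList S)).length
    = List.countP (fun k => decide (k ∈ F) && !decide (k ∈ S)) (PySem.Set.update (PySem.Set.ofList F) S) := by
  rw [PySem.Set.update_eq_append_filter, List.countP_append, List.countP_filter]
  have h1 : List.countP (fun k => decide (k ∈ F) && !decide (k ∈ S)) (PySem.Set.ofList F)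
      = List.countP (fun k => !decide (k ∈ S)) (PySem.Set.ofList F) :=
    List.countP_congr (fun k hk => by simp [(PySem.Set.mem_ofList F k).mp hk])
  have h2 : List.countP (fun a => decide (a ∈ F) && !decide (a ∈ S) && !PySem.Set.contains (PySem.Set.ofList F) a) (PySem.Set.ofList S) = 0 :=
    List.countP_eq_zero.mpr (fun k _ => by rw [contains_ofList_eq]; cases h : decide (k ∈ F) <;> simp [h])
  rw [h1, h2]
  simp only [PySem.Set.diff, contains_ofList_eq, ← List.countP_eq_length_filter]
  omega

theorem countA2 (F S : List Int) :
    (PySem.Set.diff (PySem.Set.ofList S) (PySem.Set.ofList F)).length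
    = List.countP (fun k => !decide (k ∈ F)) (PySem.Set.update (PySem.Set.ofList F) S) := by
  rw [PySem.Set.update_eq_append_filter, List.countP_append, List.countP_filter]
  have h1 : List.countP (fun k => !decide (k ∈ F)) (PySem.Set.ofList F) = 0 :=
    List.countP_eq_zero.mpr (fun k hk => by simp [(PySem.Set.mem_ofList F k).mp hk])
  have h2 : List.countP (fun a => !decide (a ∈ F) && !PySem.Set.contains (PySem.Set.ofList F) a) (PySem.Set.ofList S)
      = List.countP (fun a => !decide (a ∈ F)) (PySem.Set.ofList S) :=
    List.countP_congr (fun k _ => by rw [contains_ofList_eq]; cases h : decide (k ∈ F) <;> simp [h])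
  rw [h1, h2]
  simp only [PySem.Set.diff, contains_ofList_eq, ← List.countP_eq_length_filter]
  omega

theorem countA3 (F S : List Int) :
    (PySem.Set.inter (PySem.Set.ofList F) (PySem.Set.ofList S)).length
    = List.countP (fun k => decide (k ∈ F) && decide (k ∈ S)) (PySem.Set.update (PySem.Set.ofList F) S) := by
  rw [PySem.Set.update_eq_append_filter, List.countP_append, List.countP_filter]
  have h1 : List.countP (fun k => decide (k ∈ F) && decide (k ∈ S)) (PySem.Set.ofList F)
      = List.countP (fun k => decide (k ∈ S)) (PySem.Set.ofList F) :=
    List.countP_congr (fun k hk => by simp [(PySem.Set.mem_ofList F k).mp hk])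
  have h2 : List.countP (fun a => decide (a ∈ F) && decide (a ∈ S) && !PySem.Set.contains (PySem.Set.ofList F) a) (PySem.Set.ofList S) = 0 :=
    List.countP_eq_zero.mpr (fun k _ => by rw [contains_ofList_eq]; cases h : decide (k ∈ F) <;> simp [h])
  rw [h1, h2]
  simp only [PySem.Set.inter, contains_ofList_eq, ← List.countP_eq_length_filter]
  omega

theorem main_counts (F S : List Int) :
    (PySem.Set.len (PySem.Set.diff (PySem.Set.ofList F) (PySem.Set.ofList S)),
     PySem.Set.len (PySem.Set.diff (PySem.Set.ofList S) (PySem.Set.ofList F)),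
     PySem.Set.len (PySem.Set.inter (PySem.Set.ofList F) (PySem.Set.ofList S)))
    = ((S.foldl (fun d x => d.insert x ((d.getD x (false, false)).1, true))
        (F.foldl (fun d x => d.insert x (true, (d.getD x (false, false)).2)) PySem.Dict.empty)).values).foldl
        (fun acc fl =>
          if fl.1 && fl.2 then (acc.1, acc.2.1, acc.2.2 + 1)
          else if fl.1 then (acc.1 + 1, acc.2.1, acc.2.2)
          else (acc.1, acc.2.1 + 1, acc.2.2)) (0, 0, 0) := by
  set d1 := F.foldl (fun d x => d.insert x (true, (d.getD x (false, false)).2)) PySem.Dict.empty with hd1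
  set seen := S.foldl (fun d x => d.insert x ((d.getD x (false, false)).1, true)) d1 with hseen
  have hk1 : d1.keys = PySem.Set.ofList F := by
    rw [hd1, PySem.Dict.keys_foldl_insert]
    simp [PySem.Set.update_nil_left]
  have hk : seen.keys = PySem.Set.update (PySem.Set.ofList F) S := by
    rw [hseen, PySem.Dict.keys_foldl_insert, hk1]
  have hnd : seen.keys.Nodup := by
    rw [hseen]
    exact PySem.Dict.nodup_keys_foldl_insert _ _ _
      (by rw [hd1]; exact PySem.Dict.nodup_keys_foldl_insert _ _ _ PySem.Dict.nodup_keys_empty)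
  have hget : ∀ k, seen.getD k (false, false) = (decide (k ∈ F), decide (k ∈ S)) := by
    intro k
    rw [hseen, getD_pass2, hd1, getD_pass1]
    simp
  rw [PySem.Dict.values_eq_map_keys seen hnd (false, false), count_fold, hk]
  simp only [List.countP_map]
  have hc : ∀ (p : Bool × Bool → Bool),
      List.countP (p ∘ fun k => seen.getD k (false, false)) (PySem.Set.update (PySem.Set.ofList F) S)
      = List.countP (fun k => p (decide (k ∈ F), decide (k ∈ S))) (PySem.Set.update (PySem.Set.ofList F) S) :=
    fun p => List.countP_congr (fun k _ => by simp [hget k])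
  rw [hc, hc, hc]
  simp only [PySem.Set.len]
  rw [countA1, countA2, countA3]
  simp

-- ===== VERDICT (by name: the statement is the Claim_ definition above) =====
theorem count_unique_results_spec : Claim_equal_count_unique_results := by
  intro fts sem _
  unfold Spec_count_unique_results count_unique_results count_unique_results_alt
  simp only [foldl_getId]
  exact main_counts (fts.filterMap (fun r => (PySem.Dict.mk r).get? "id"))
    (sem.filterMap (fun r => (PySem.Dict.mk r).get? "id"))
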